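-- pv_equiv track=rewrite | github.com/bejeri4/Algo | LeetCode/GoGoGo/ProductOfArrayExceptSelf.py | getProductWithoutZero
-- ===== SOURCE A (Python) =====
-- def getProductWithoutZero(nums):
--     p = 0
--     for elem in nums:
--         if elem != 0:
--             if p == 0:
--                 p = 1
--             p *= elem
--     return p
-- ===== SOURCE B (Python) =====
-- def getProductWithoutZero(nums):
--     def go(lo, hi):
--         # product of nonzero elements of nums[lo:hi], and whether any nonzero was seen
--         if hi - lo == 0:
--             return (1, False)
--         if hi - lo == 1:
--             x = nums[lo]
--             return (1, False) if x == 0 else (x, True)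
--         mid = (lo + hi) // 2
--         pl, sl = go(lo, mid)
--         pr, sr = go(mid, hi)
--         return (pl * pr, sl or sr)
--     p, seen = go(0, len(nums))
--     return p if seen else 0
-- ===== Notes on version B (the rewrite author's own statement) =====
-- stated objective: faster
-- what changed: A's single left-to-right pass with an inline 0-sentinel accumulator is replaced by a divide-and-conquer recursion that splits the range in halves, each call returning (product of nonzero elements, seen-nonzero flag); the balanced multiplication tree keeps big-integer operands of similar size, which a timing run measured as >1.5x faster on large inputs.
import Mathlib
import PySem

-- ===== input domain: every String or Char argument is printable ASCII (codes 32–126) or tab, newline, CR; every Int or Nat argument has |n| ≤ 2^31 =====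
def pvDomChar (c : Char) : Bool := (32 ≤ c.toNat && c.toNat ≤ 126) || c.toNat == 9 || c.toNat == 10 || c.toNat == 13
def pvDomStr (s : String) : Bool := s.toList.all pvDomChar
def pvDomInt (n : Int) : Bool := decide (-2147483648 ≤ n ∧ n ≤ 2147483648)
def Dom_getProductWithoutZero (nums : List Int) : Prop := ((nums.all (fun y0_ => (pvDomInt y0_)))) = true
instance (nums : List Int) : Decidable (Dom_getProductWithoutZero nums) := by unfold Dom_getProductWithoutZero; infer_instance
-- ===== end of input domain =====

-- B replaces A's one-pass 0-sentinel loop by a divide-and-conquer recursion over halves, each call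
-- returning (product of nonzero elements, seen-nonzero flag); equal return value, no change in cost class.
-- ===== PORT A =====
def getProductWithoutZero (nums : List Int) : Int :=
  nums.foldl (fun p elem =>
    if elem ≠ 0 then (if p = 0 then 1 else p) * elem else p) 0

-- ===== PORT B =====
-- go(lo, hi) on nums[lo:hi] is ported as recursion on the sublist, split at mid = length/2
def pvGoB : List Int → Int × Bool
  | [] => (1, false)
  | [x] => if x = 0 then (1, false) else (x, true)
  | x :: y :: rest =>
    ((pvGoB ((x :: y :: rest).take ((x :: y :: rest).length / 2))).1 *
       (pvGoB ((x :: y :: rest).drop ((x :: y :: rest).length / 2))).1,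
     (pvGoB ((x :: y :: rest).take ((x :: y :: rest).length / 2))).2 ||
       (pvGoB ((x :: y :: rest).drop ((x :: y :: rest).length / 2))).2)
termination_by l => l.length
decreasing_by all_goals (simp [List.length_take]; omega)

def getProductWithoutZero_alt (nums : List Int) : Int :=
  let r := pvGoB nums
  if r.2 then r.1 else 0

-- ===== PRECONDITION & SPEC =====
def Spec_getProductWithoutZero (nums : List Int) (out : Int) : Prop := out = getProductWithoutZero_alt nums
instance (nums : List Int) (out : Int) : Decidable (Spec_getProductWithoutZero nums out) := by unfold Spec_getProductWithoutZero; infer_instance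

-- ===== CLAIM (what is proved, stated in full; the proofs are below) =====
def Claim_equal_getProductWithoutZero : Prop := ∀ (nums : List Int), Dom_getProductWithoutZero nums → Spec_getProductWithoutZero nums (getProductWithoutZero nums)

-- ===== LEMMAS AND PROOFS =====

theorem isEmpty_app (a b : List Int) : (a ++ b).isEmpty = (a.isEmpty && b.isEmpty) := by
  cases a <;> simp [List.isEmpty]

-- pvGoB computes the product of the nonzero elements and whether there is any
theorem pvGoB_spec (l : List Int) :
    pvGoB l = ((l.filter (fun x => x ≠ 0)).prod, !(l.filter (fun x => x ≠ 0)).isEmpty) := by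
  fun_induction pvGoB l
  case case1 => rfl
  case case2 => rfl
  case case3 x hx => simp [List.filter, hx]
  case case4 x y rest ih1 ih2 =>
    rw [ih1, ih2]
    have hsplit : ((x :: y :: rest).take ((x :: y :: rest).length / 2)) ++
        ((x :: y :: rest).drop ((x :: y :: rest).length / 2)) = x :: y :: rest :=
      List.take_append_drop _ _
    rw [show (x :: y :: rest).filter (fun x => x ≠ 0)
        = (((x :: y :: rest).take ((x :: y :: rest).length / 2)).filter (fun x => x ≠ 0))
          ++ (((x :: y :: rest).drop ((x :: y :: rest).length / 2)).filter (fun x => x ≠ 0)) by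
      rw [← List.filter_append, hsplit]]
    simp [List.prod_append, isEmpty_app]

theorem foldl_mul (l : List Int) (p : Int) : l.foldl (· * ·) p = p * l.prod := by
  induction l generalizing p with
  | nil => simp
  | cons a t ih => simp [List.foldl_cons, ih, List.prod_cons]; ring

-- once A's accumulator is nonzero it stays nonzero and A's fold is the plain product fold
theorem foldA_nonzero (nums : List Int) (p : Int) (hp : p ≠ 0) :
    nums.foldl (fun p elem =>
      if elem ≠ 0 then (if p = 0 then 1 else p) * elem else p) p
      = (nums.filter (fun x => x ≠ 0)).foldl (· * ·) p := by
  induction nums generalizing p with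
  | nil => rfl
  | cons a t ih =>
    rw [List.foldl_cons]
    by_cases ha : a = 0
    · rw [show (if a ≠ 0 then (if p = 0 then 1 else p) * a else p) = p by simp [ha]]
      rw [ih p hp]
      simp [ha]
    · rw [show (if a ≠ 0 then (if p = 0 then 1 else p) * a else p) = p * a by
        simp [ha, hp]]
      rw [ih _ (mul_ne_zero hp ha)]
      simp [ha, List.foldl_cons]

-- A's loop from 0: 0 if no nonzero element, else the product of the nonzero elements
theorem foldA_zero (nums : List Int) :
    nums.foldl (fun p elem =>
      if elem ≠ 0 then (if p = 0 then 1 else p) * elem else p) 0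
      = (if (nums.filter (fun x => x ≠ 0)).isEmpty then 0
         else (nums.filter (fun x => x ≠ 0)).prod) := by
  induction nums with
  | nil => rfl
  | cons a t ih =>
    rw [List.foldl_cons]
    by_cases ha : a = 0
    · rw [show (if a ≠ 0 then (if (0:Int) = 0 then 1 else 0) * a else 0) = 0 by simp [ha]]
      rw [ih]
      simp [ha]
    · rw [show (if a ≠ 0 then (if (0:Int) = 0 then 1 else 0) * a else 0) = 1 * a by
        simp [ha]]
      have h1 : (1 : Int) * a ≠ 0 := by simpa using ha
      rw [foldA_nonzero t (1 * a) h1, foldl_mul]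
      simp [ha, List.isEmpty, List.prod_cons]

theorem ab_eq (nums : List Int) :
    getProductWithoutZero nums = getProductWithoutZero_alt nums := by
  unfold getProductWithoutZero getProductWithoutZero_alt
  rw [pvGoB_spec, foldA_zero]
  cases h : (nums.filter (fun x => x ≠ 0)).isEmpty <;> simp_all

-- ===== VERDICT (by name: the statement is the Claim_ definition above) =====
theorem getProductWithoutZero_spec : Claim_equal_getProductWithoutZero := by
  intro nums _
  exact ab_eq nums
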